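-- pv_equiv track=rewrite | github.com/cherkavi/python-utilities | mail/imap-client-xing-remover.py | retrieve_time
-- ===== SOURCE A (Python) =====
-- def retrieve_time(text_lines):
--     flag = False
--     for each_line in text_lines:
--         if flag:
--             return each_line
--         if each_line.endswith("wrote a post:"):
--             flag = True
--     return None
-- ===== SOURCE B (Python) =====
-- def retrieve_time(text_lines):
--     lines = list(text_lines)
--     hits = [i for i, line in enumerate(lines) if line.endswith("wrote a post:")]
--     if not hits:
--         return None
--     j = hits[0] + 1
--     return lines[j] if j < len(lines) else None
-- ===== Notes on version B (the rewrite author's own statement) =====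
-- stated objective: alternative
-- what changed: Replaces A's flag-carrying single scan with two staged passes: first collect the indices of all lines ending with the marker via an enumerate comprehension, then index the list at first-hit + 1 (or None if the marker line is last).
import Mathlib
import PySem

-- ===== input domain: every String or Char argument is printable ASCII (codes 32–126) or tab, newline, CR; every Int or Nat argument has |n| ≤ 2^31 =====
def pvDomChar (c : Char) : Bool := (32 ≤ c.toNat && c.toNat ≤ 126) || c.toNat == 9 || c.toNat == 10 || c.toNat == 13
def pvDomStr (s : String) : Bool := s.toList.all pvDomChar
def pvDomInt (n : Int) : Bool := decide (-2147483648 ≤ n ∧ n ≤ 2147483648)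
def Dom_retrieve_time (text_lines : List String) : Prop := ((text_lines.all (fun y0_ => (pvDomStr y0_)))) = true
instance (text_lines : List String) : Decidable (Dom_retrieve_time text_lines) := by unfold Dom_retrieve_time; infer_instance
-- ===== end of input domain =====

-- B replaces A's flag-carrying single scan with two staged passes (collect match indices, then index at first hit + 1); alternative decomposition, same cost.


-- ===== PORT A =====
def retrieveTimeGo (text_lines : List String) (flag : Bool) : Option String :=
  match text_lines with
  | [] => none
  | each_line :: rest =>
    if flag then some each_line
    else retrieveTimeGo rest (if PySem.Str.endswith each_line "wrote a post:" then true else flag)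

def retrieve_time (text_lines : List String) : Option String :=
  retrieveTimeGo text_lines false

-- ===== PORT B =====
-- B: staged passes — comprehension collecting the indices of all marker lines, then index at first hit + 1
def retrieve_time_alt (text_lines : List String) : Option String :=
  let lines := text_lines
  let hits := ((PySem.List.enumerate lines).filter
      (fun p => PySem.Str.endswith p.2 "wrote a post:")).map (fun p => p.1)
  match hits with
  | [] => none
  | i :: _ =>
    let j := i + 1
    if j < (lines.length : Int) then PySem.List.pyGet? lines j else none

-- ===== PRECONDITION & SPEC =====
def Spec_retrieve_time (text_lines : List String) (out : Option String) : Prop := out = retrieve_time_alt text_lines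
instance (text_lines : List String) (out : Option String) : Decidable (Spec_retrieve_time text_lines out) := by unfold Spec_retrieve_time; infer_instance

-- ===== CLAIM =====
def Claim_equal_retrieve_time : Prop := ∀ (text_lines : List String), Dom_retrieve_time text_lines → Spec_retrieve_time text_lines (retrieve_time text_lines)

-- ===== LEMMAS AND PROOFS =====
theorem retrieveTimeGo_true (l : List String) : retrieveTimeGo l true = l.head? := by
  cases l <;> simp [retrieveTimeGo]

-- hits of B, generalized over the enumerate start index
theorem hits_shift {α : Type} (q : α → Bool) (l : List α) (s : Int) :
    ((PySem.List.enumerate l s).filter (fun p => q p.2)).map (fun p => p.1)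
    = (((PySem.List.enumerate l 0).filter (fun p => q p.2)).map (fun p => p.1)).map
        (fun i => i + s) := by
  induction l generalizing s with
  | nil => simp [PySem.List.enumerate_nil]
  | cons x xs ih =>
    cases hb : q x <;>
      simp only [PySem.List.enumerate_cons, List.filter_cons, hb, Bool.false_eq_true, if_false,
        if_true, List.map_cons, List.cons.injEq, zero_add, ih (s + 1), ih 1, List.map_map]
    · apply List.map_congr_left; intro a _; simp only [Function.comp_apply]; omega
    · refine ⟨trivial, ?_⟩
      apply List.map_congr_left; intro a _; simp only [Function.comp_apply]; omega

theorem hits_nonneg {α : Type} (q : α → Bool) (l : List α) (i : Int)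
    (h : i ∈ ((PySem.List.enumerate l 0).filter (fun p => q p.2)).map (fun p => p.1)) :
    0 ≤ i := by
  simp only [List.mem_map, List.mem_filter] at h
  obtain ⟨p, ⟨hp, -⟩, rfl⟩ := h
  obtain ⟨k, -, rfl⟩ := (PySem.List.mem_enumerate_iff _ _ _).1 hp
  simp

theorem retrieveTimeGo_false (l : List String) :
    retrieveTimeGo l false = retrieve_time_alt l := by
  induction l with
  | nil => rfl
  | cons x xs ih =>
    unfold retrieveTimeGo
    simp only [retrieve_time_alt, if_neg Bool.false_ne_true]
    rw [PySem.List.enumerate_cons, List.filter_cons]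
    cases hb : PySem.Str.endswith x "wrote a post:"
    · simp only [Bool.false_eq_true, if_false]
      rw [ih]
      simp only [retrieve_time_alt, zero_add]
      rw [hits_shift (fun y => PySem.Str.endswith y "wrote a post:") xs 1]
      cases hh : ((PySem.List.enumerate xs 0).filter
          (fun p => PySem.Str.endswith p.2 "wrote a post:")).map (fun p => p.1) with
      | nil => simp
      | cons i is =>
        have hi : 0 ≤ i := hits_nonneg (fun y => PySem.Str.endswith y "wrote a post:") xs i (by rw [hh]; exact List.mem_cons_self)
        simp only [List.map_cons]
        by_cases hlt : i + 1 < (xs.length : Int)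
        · rw [if_pos hlt, if_pos (by simp; omega)]
          have h2 : i + 1 + 1 = ((i.toNat + 1 : Nat) : Int) + 1 := by omega
          rw [h2, PySem.List.pyGet?_cons_succ]
          congr 1; omega
        · rw [if_neg hlt, if_neg (by simp; omega)]
    · simp only [if_true]
      rw [retrieveTimeGo_true]
      simp only [List.map_cons]
      cases xs with
      | nil => simp
      | cons y ys =>
        rw [if_pos (by simp)]
        have h1 : (0 : Int) + 1 = ((1 : Nat) : Int) := by omega
        rw [h1, PySem.List.pyGet?_natCast]
        rfl

-- ===== VERDICT =====
theorem retrieve_time_spec : Claim_equal_retrieve_time := by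
  intro l _
  unfold Spec_retrieve_time retrieve_time
  exact retrieveTimeGo_false l
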